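-- pv_equiv track=rewrite | github.com/egerdem/orientation-calibration | recursion_r7.py | structure_nm
-- ===== SOURCE A (Python) =====
-- def key2list(dic):
--     t = list(dic.keys())
--     res = [list(row) for row in t]
--     return(res)
--
-- def structure_nm(dic):
--     keys_list = key2list(dic)
--     keys_reached = []
--     while(len(keys_list)>2):
--         keys_list = keys_list[1:-1]
--         new_keys = []
--         for i in range(len(keys_list)):
--             origin = keys_list[i]
--             l,s,n,m = origin
--             res = (l, s, n+1, m)
--             new_keys.append(res)
--         keys_reached.append(new_keys)
--         keys_list = new_keys
--     return(keys_reached)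
-- ===== SOURCE B (Python) =====
-- def structure_nm(dic):
--     keys = list(dic.keys())
--     N = len(keys)
--     out = []
--     for k in range(1, (N + 1) // 2):
--         out.append([(l, s, n + k, m) for (l, s, n, m) in keys[k:N - k]])
--     return out
-- ===== Notes on version B (the rewrite author's own statement) =====
-- stated objective: simpler
-- what changed: B computes each output row k directly from the original key list as keys[k:N-k] with the third component raised by k (one formula per row), instead of A's while-loop that repeatedly trims the previous row at both ends and re-increments every element.
import Mathlib
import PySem

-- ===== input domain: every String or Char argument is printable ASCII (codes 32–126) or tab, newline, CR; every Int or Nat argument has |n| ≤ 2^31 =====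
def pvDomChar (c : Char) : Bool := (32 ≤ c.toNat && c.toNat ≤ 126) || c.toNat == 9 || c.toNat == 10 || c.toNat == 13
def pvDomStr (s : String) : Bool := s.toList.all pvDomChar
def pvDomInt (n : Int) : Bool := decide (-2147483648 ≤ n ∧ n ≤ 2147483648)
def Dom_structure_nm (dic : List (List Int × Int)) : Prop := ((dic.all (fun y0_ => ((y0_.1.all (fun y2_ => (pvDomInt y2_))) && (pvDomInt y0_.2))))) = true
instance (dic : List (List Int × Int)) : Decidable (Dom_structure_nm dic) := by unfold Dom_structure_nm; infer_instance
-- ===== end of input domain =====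

-- B builds each output row directly from the original key list (row k = keys[k:N-k] with the third
-- component raised by k) instead of A's repeated trim-and-increment of the previous row; objective: simpler.

-- ===== PORT A =====
-- `l, s, n, m = origin` : Python raises ValueError unless origin has exactly 4 items;
-- those inputs are excluded by Pre_ below, here we return a dummy.
def pvUnpack4 (xs : List Int) : Int × Int × Int × Int :=
  match xs with
  | [l, s, n, m] => (l, s, n, m)
  | _ => (0, 0, 0, 0)

def key2list (dic : List (List Int × Int)) : List (List Int) :=
  let t := (PySem.Dict.ofList dic).keys
  let res := t.map (fun row => row)   -- list(row) on a tuple: identity under the type convention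
  res

-- A's inner for-loop: for i in range(len(keys_list)): unpack keys_list[i], append (l, s, n+1, m)
def pvPass (keys' : List (List Int)) : List (List Int) :=
  (PySem.List.pyRange 0 (PySem.List.len keys')).foldl
    (fun new_keys i =>
      let origin := PySem.List.pyGetD keys' i []
      let (l, s, n, m) := pvUnpack4 origin
      new_keys ++ [[l, s, n + 1, m]]) []

-- one pass maps each origin to (l, s, n+1, m) (cited by pvLoopA's decreasing_by)
theorem pvPass_eq (keys' : List (List Int)) :
    pvPass keys' =
    keys'.map (fun origin =>
        let (l, s, n, m) := pvUnpack4 origin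
        [l, s, n + 1, m]) := by
  unfold pvPass
  have hb : (fun (new_keys : List (List Int)) (i : Int) =>
        let origin := PySem.List.pyGetD keys' i []
        let (l, s, n, m) := pvUnpack4 origin
        new_keys ++ [[l, s, n + 1, m]])
      = (fun acc i => (fun (a : List (List Int)) (x : List Int) => a ++
          [let (l, s, n, m) := pvUnpack4 x; [l, s, n + 1, m]]) acc (PySem.List.pyGetD keys' i [])) := by
    funext acc i; rfl
  have h2 := PySem.List.foldl_pyRange_pyGetD keys' ([] : List Int)
    (fun (a : List (List Int)) (x : List Int) => a ++
      [let (l, s, n, m) := pvUnpack4 x; [l, s, n + 1, m]]) [] (le_refl 0)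
  rw [hb, h2, show Int.toNat 0 = 0 from rfl, List.drop_zero]
  have h3 := PySem.List.foldl_append_singleton_eq_map
      (fun (x : List Int) => let (l, s, n, m) := pvUnpack4 x; [l, s, n + 1, m]) keys' ([] : List (List Int))
  rw [List.nil_append] at h3
  exact h3

theorem pv_slice_one_neg_one {α : Type} (xs : List α) :
    PySem.List.slice xs (some 1) (some (-1)) = xs.tail.dropLast := by
  simp only [PySem.List.slice, PySem.List.clampIdx]
  rcases xs with _ | ⟨x, t⟩
  · simp
  · simp only [List.length_cons, List.tail_cons]
    norm_num
    rw [List.dropLast_eq_take]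
    congr 1

-- the while-loop of A (each round trims one element at both ends, so the length drops by 2)
def pvLoopA (keys_list : List (List Int)) : List (List (List Int)) :=
  if _h : 2 < keys_list.length then
    let keys' := PySem.List.slice keys_list (some 1) (some (-1))
    let new_keys := pvPass keys'
    new_keys :: pvLoopA new_keys
  else []
termination_by keys_list.length
decreasing_by
  rw [pvPass_eq, pv_slice_one_neg_one]
  simp only [List.length_map, List.length_dropLast, List.length_tail]
  omega

def structure_nm (dic : List (List Int × Int)) : List (List (List Int)) :=
  pvLoopA (key2list dic)

-- ===== PORT B =====
def pvShift (k : Int) (key : List Int) : List Int :=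
  let (l, s, n, m) := pvUnpack4 key
  [l, s, n + k, m]

def structure_nm_alt (dic : List (List Int × Int)) : List (List (List Int)) :=
  let keys := (PySem.Dict.ofList dic).keys
  let N : Int := PySem.List.len keys
  (PySem.List.pyRange 1 (PySem.Int.floordiv (N + 1) 2)).foldl
    (fun out k =>
      out ++ [(PySem.List.slice keys (some k) (some (N - k))).map (pvShift k)]) []

-- ===== PRECONDITION & SPEC =====
-- Pre_ excludes exactly the inputs on which Python A raises ValueError: a key other than the
-- first or last of the dict whose tuple does not have exactly 4 components (B raises there too).
def Pre_structure_nm (dic : List (List Int × Int)) : Prop :=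
  ∀ y ∈ ((PySem.Dict.ofList dic).keys).tail.dropLast, y.length = 4
instance (dic : List (List Int × Int)) : Decidable (Pre_structure_nm dic) := by
  unfold Pre_structure_nm; infer_instance

def pvWitness_structure_nm : (List (List Int × Int)) :=
  [([1, 2, 3, 4], 0), ([5, 6, 7, 8], 1), ([9, 10, 11, 12], 2)]

def Spec_structure_nm (dic : List (List Int × Int)) (out : List (List (List Int))) : Prop := out = structure_nm_alt dic
instance (dic : List (List Int × Int)) (out : List (List (List Int))) : Decidable (Spec_structure_nm dic out) := by unfold Spec_structure_nm; infer_instance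

-- ===== CLAIM (what is proved, stated in full; the proofs are below) =====
def Claim_equal_structure_nm : Prop := ∀ (dic : List (List Int × Int)), Dom_structure_nm dic → Pre_structure_nm dic → Spec_structure_nm dic (structure_nm dic)

-- ===== LEMMAS AND PROOFS =====

-- row k, phrased over Nat: keys[k : N-k], third component raised by k
def pvRowNat (keys : List (List Int)) (k : Nat) : List (List Int) :=
  ((keys.drop k).take (keys.length - 2 * k)).map (pvShift (k : Int))

theorem pvShift_comp (k : Int) (key : List Int) :
    pvShift k (pvShift 1 key) = pvShift (k + 1) key := by
  simp only [pvShift]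
  rcases h : pvUnpack4 key with ⟨l, s, n, m⟩
  simp [pvUnpack4]
  ring

theorem pv_tail_dropLast {α : Type} (keys : List α) :
    keys.tail.dropLast = (keys.drop 1).take (keys.length - 2) := by
  rw [← List.drop_one, List.dropLast_eq_take, List.length_drop]
  congr 1

theorem pvRowNat_step (keys : List (List Int)) (k : Nat) :
    pvRowNat ((keys.tail.dropLast).map (pvShift 1)) k = pvRowNat keys (k + 1) := by
  have ht := pv_tail_dropLast keys
  rw [ht]
  simp only [pvRowNat, List.length_map, ← List.map_drop, ← List.map_take, List.map_map,
    List.length_take, List.length_drop, List.drop_take, List.take_take, List.drop_drop]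
  rw [show min (min (keys.length - 2) (keys.length - 1) - 2 * k) (keys.length - 2 - k)
        = keys.length - 2 * (k + 1) from by omega,
      show 1 + k = k + 1 from by omega]
  refine List.map_congr_left (fun x _ => ?_)
  have hc := pvShift_comp (k : Int) x
  simpa [Function.comp, Nat.cast_add, Nat.cast_one] using hc

theorem pvLoopA_eq (keys : List (List Int)) :
    pvLoopA keys = (List.range ((keys.length - 1) / 2)).map (fun j => pvRowNat keys (j + 1)) := by
  suffices H : ∀ (N : Nat) (keys : List (List Int)), keys.length = N →
      pvLoopA keys = (List.range ((keys.length - 1) / 2)).map (fun j => pvRowNat keys (j + 1)) from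
    H keys.length keys rfl
  intro N
  induction N using Nat.strong_induction_on with
  | _ N ih =>
    intro keys hN
    by_cases h : 2 < keys.length
    · rw [pvLoopA, dif_pos h]
      show pvPass (PySem.List.slice keys (some 1) (some (-1)))
          :: pvLoopA (pvPass (PySem.List.slice keys (some 1) (some (-1)))) = _
      have hp : pvPass (PySem.List.slice keys (some 1) (some (-1)))
          = (keys.tail.dropLast).map (pvShift 1) := by
        rw [pvPass_eq, pv_slice_one_neg_one]; rfl
      rw [hp]
      have hlen : ((keys.tail.dropLast).map (pvShift 1)).length = keys.length - 2 := by
        simp only [List.length_map, List.length_dropLast, List.length_tail]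
        omega
      rw [ih (keys.length - 2) (by omega) _ (by rw [hlen]), hlen]
      rw [show (keys.length - 1) / 2 = ((keys.length - 2 - 1) / 2) + 1 from by omega,
        List.range_succ_eq_map]
      simp only [List.map_cons, List.map_map]
      refine congrArg₂ List.cons ?_ ?_
      · rw [pvRowNat, pv_tail_dropLast]
        norm_num
      · refine List.map_congr_left (fun j _ => ?_)
        simpa using pvRowNat_step keys (j + 1)
    · rw [pvLoopA, dif_neg h, show (keys.length - 1) / 2 = 0 from by omega]
      simp

theorem pvAlt_eq (dic : List (List Int × Int)) :
    structure_nm_alt dic =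
      (List.range ((((PySem.Dict.ofList dic).keys).length - 1) / 2)).map
        (fun j => pvRowNat ((PySem.Dict.ofList dic).keys) (j + 1)) := by
  unfold structure_nm_alt
  have h3 := PySem.List.foldl_append_singleton_eq_map
      (fun k => (PySem.List.slice ((PySem.Dict.ofList dic).keys) (some k)
        (some (PySem.List.len ((PySem.Dict.ofList dic).keys) - k))).map (pvShift k))
      (PySem.List.pyRange 1 (PySem.Int.floordiv (PySem.List.len ((PySem.Dict.ofList dic).keys) + 1) 2))
      ([] : List (List (List Int)))
  rw [List.nil_append] at h3
  rw [h3]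
  have hlen : PySem.List.len ((PySem.Dict.ofList dic).keys)
      = (((PySem.Dict.ofList dic).keys).length : Int) := rfl
  set K := (PySem.Dict.ofList dic).keys with hK
  set n := K.length with hn
  rw [PySem.List.pyRange_of_pos 1 _ (by norm_num : (0:Int) < 1)]
  have hM : PySem.Int.floordiv (PySem.List.len K + 1) 2 = ((n : Int) + 1) / 2 := by
    rw [hlen, PySem.Int.floordiv_eq_ediv_of_pos (by norm_num)]
  rw [hM]
  have hcnt : (if (1:Int) < ((n : Int) + 1) / 2
      then ((((n : Int) + 1) / 2 - 1 + 1 - 1) / 1).toNat else 0) = (n - 1) / 2 := by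
    split <;> omega
  rw [hcnt, List.map_map]
  refine List.map_congr_left (fun j hj => ?_)
  rw [List.mem_range] at hj
  have hj1 : (1 : Int) + 1 * (j : Int) = ((j + 1 : Nat) : Int) := by push_cast; ring
  have hsub : PySem.List.len K - ((j + 1 : Nat) : Int) = ((n - (j + 1) : Nat) : Int) := by
    rw [hlen]; omega
  show (PySem.List.slice K (some ((1:Int) + 1 * (j:Int)))
      (some (PySem.List.len K - ((1:Int) + 1 * (j:Int))))).map (pvShift ((1:Int) + 1 * (j:Int)))
    = pvRowNat K (j + 1)
  rw [hj1, hsub, PySem.List.slice_natCast, pvRowNat,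
    show n - (j + 1) - (j + 1) = n - 2 * (j + 1) from by omega]

-- ===== VERDICT (by name: the statement is the Claim_ definition above) =====
theorem structure_nm_spec : Claim_equal_structure_nm := by
  intro dic _ _
  have hk : key2list dic = (PySem.Dict.ofList dic).keys := by
    simp [key2list]
  unfold Spec_structure_nm structure_nm
  rw [hk, pvLoopA_eq, pvAlt_eq]
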